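-- pv_equiv track=rewrite | github.com/jsampedroc/gpt-factory-domain-kit | ai/graph/dependency_graph_builder.py | build
-- ===== SOURCE A (Python) =====
-- from collections import defaultdict, deque
--
-- def build(architecture):
--
--     inventory = architecture.get("file_inventory", [])
--
--     nodes = []
--     edges = defaultdict(set)
--
--     # collect nodes first
--     for item in inventory:
--         nodes.append(item["path"])
--
--     # map entity → paths to make dependency resolution easier
--     entity_paths = {}
--     for item in inventory:
--         entity = item.get("entity")
--         if entity:
--             entity_paths.setdefault(entity, []).append(item["path"])
--
--     for item in inventory:
--
--         path = item["path"]
--         entity = item.get("entity")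
--         desc = item.get("description", "")
--
--         if not entity:
--             continue
--
--         # Service depends on Repository + Entity
--         if desc == "Service":
--             dep = f"domain/repository/{entity}Repository.java"
--             if dep in nodes:
--                 edges[path].add(dep)
--
--             dep = f"domain/model/{entity}.java"
--             if dep in nodes:
--                 edges[path].add(dep)
--
--         # Repository depends on Entity
--         if desc == "Repository Interface":
--             dep = f"domain/model/{entity}.java"
--             if dep in nodes:
--                 edges[path].add(dep)
--
--         # Controller depends on Service
--         if desc == "Controller":
--             dep = f"application/service/{entity}Service.java"
--             if dep in nodes:
--                 edges[path].add(dep)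
--
--         # Mapper depends on Entity
--         if desc == "Mapper":
--             dep = f"domain/model/{entity}.java"
--             if dep in nodes:
--                 edges[path].add(dep)
--
--     return nodes, edges
-- ===== SOURCE B (Python) =====
-- from collections import defaultdict
--
-- _MODEL = ("domain/model/", ".java")
-- _REPO = ("domain/repository/", "Repository.java")
-- _SERVICE = ("application/service/", "Service.java")
--
--
-- def _index(nodes, prefix, suffix):
--     """Entities whose file of this role exists among the nodes, recovered by
--     parsing each node path (strip prefix and suffix) instead of formatting
--     candidate paths and searching for them."""
--     lo, hi = len(prefix), len(suffix)
--     return {n[lo:len(n) - hi] for n in nodes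
--             if lo + hi <= len(n) and n.startswith(prefix) and n.endswith(suffix)}
--
--
-- def build(architecture):
--     inventory = architecture.get("file_inventory", [])
--     nodes = [item["path"] for item in inventory]
--     models = _index(nodes, *_MODEL)
--     repos = _index(nodes, *_REPO)
--     services = _index(nodes, *_SERVICE)
--     edges = defaultdict(set)
--     for item in inventory:
--         entity = item.get("entity")
--         if not entity:
--             continue
--         path = item["path"]
--         desc = item.get("description", "")
--         if desc == "Service":
--             if entity in repos:
--                 edges[path].add(_REPO[0] + entity + _REPO[1])
--             if entity in models:
--                 edges[path].add(_MODEL[0] + entity + _MODEL[1])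
--         elif desc in ("Repository Interface", "Mapper"):
--             if entity in models:
--                 edges[path].add(_MODEL[0] + entity + _MODEL[1])
--         elif desc == "Controller":
--             if entity in services:
--                 edges[path].add(_SERVICE[0] + entity + _SERVICE[1])
--     return nodes, edges
-- ===== Notes on version B (the rewrite author's own statement) =====
-- stated objective: alternative
-- what changed: B inverts the search direction: instead of formatting each candidate dependency path and scanning the node list for it (and building A's unused entity_paths map), B parses the node paths once into three per-role entity sets (strip prefix/suffix after startswith/endswith guards) and the per-item checks become entity membership in the matching role index.
import Mathlib
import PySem

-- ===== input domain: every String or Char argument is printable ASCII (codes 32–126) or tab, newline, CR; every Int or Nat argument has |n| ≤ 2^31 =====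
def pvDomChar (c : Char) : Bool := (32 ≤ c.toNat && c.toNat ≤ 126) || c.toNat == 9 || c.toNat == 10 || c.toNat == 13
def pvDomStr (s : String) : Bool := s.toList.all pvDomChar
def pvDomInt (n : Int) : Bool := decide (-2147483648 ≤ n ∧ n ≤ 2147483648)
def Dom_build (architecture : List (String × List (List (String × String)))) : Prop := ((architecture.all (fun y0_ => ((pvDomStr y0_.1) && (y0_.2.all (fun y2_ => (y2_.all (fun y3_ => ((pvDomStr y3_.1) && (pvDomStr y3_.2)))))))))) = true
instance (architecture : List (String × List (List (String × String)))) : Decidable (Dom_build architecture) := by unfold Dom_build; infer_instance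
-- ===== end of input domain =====

-- B inverts A's search direction: instead of formatting each candidate dependency path and scanning the node
-- list for it, B parses the node paths once into per-role entity indexes and then only tests entity membership;
-- objective: alternative. Equality proved on Pre_ (every inventory item has a "path" key).

-- ===== PORT A =====
-- item["path"] is total here because Pre_build guarantees the key; the getD "" default is never used under Pre_.
def build (architecture : List (String × List (List (String × String)))) : List String × (List (String × List String)) :=
  let inventory := (PySem.Dict.mk architecture).getD "file_inventory" []
  -- collect nodes first
  let nodes := inventory.foldl (fun ns item => ns ++ [((PySem.Dict.mk item).get? "path").getD ""]) []
  -- map entity → paths (computed, as in A, but never read afterwards)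
  let _entity_paths := inventory.foldl (fun d item =>
      let entity := ((PySem.Dict.mk item).get? "entity").getD ""
      if entity = "" then d
      else d.modify entity [] (fun ps => ps ++ [((PySem.Dict.mk item).get? "path").getD ""]))
    (PySem.Dict.empty : PySem.Dict String (List String))
  let edges := inventory.foldl (fun ed item =>
      let path := ((PySem.Dict.mk item).get? "path").getD ""
      let entity := ((PySem.Dict.mk item).get? "entity").getD ""
      let desc := ((PySem.Dict.mk item).get? "description").getD ""
      if entity = "" then ed
      else
        let ed :=
          if desc = "Service" then
            let dep := "domain/repository/" ++ entity ++ "Repository.java"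
            let ed := if nodes.contains dep then ed.modify path [] (fun s => PySem.Set.add s dep) else ed
            let dep := "domain/model/" ++ entity ++ ".java"
            if nodes.contains dep then ed.modify path [] (fun s => PySem.Set.add s dep) else ed
          else ed
        let ed :=
          if desc = "Repository Interface" then
            let dep := "domain/model/" ++ entity ++ ".java"
            if nodes.contains dep then ed.modify path [] (fun s => PySem.Set.add s dep) else ed
          else ed
        let ed :=
          if desc = "Controller" then
            let dep := "application/service/" ++ entity ++ "Service.java"
            if nodes.contains dep then ed.modify path [] (fun s => PySem.Set.add s dep) else ed
          else ed
        if desc = "Mapper" then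
          let dep := "domain/model/" ++ entity ++ ".java"
          if nodes.contains dep then ed.modify path [] (fun s => PySem.Set.add s dep) else ed
        else ed)
    (PySem.Dict.empty : PySem.Dict String (PySem.Set String))
  (nodes, edges.items)

-- ===== PORT B =====
-- Source B's _index: the set of entities whose file of the given role is present among the nodes,
-- recovered by parsing each node path (length guard, startswith, endswith, strip the affixes).
def buildIndex (nodes : List String) (pre suf : String) : PySem.Set String :=
  let lo := PySem.Str.len pre
  let hi := PySem.Str.len suf
  PySem.Set.ofList
    ((nodes.filter (fun n =>
        decide (lo + hi ≤ PySem.Str.len n) && PySem.Str.startswith n pre && PySem.Str.endswith n suf)).map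
      (fun n => PySem.Str.slice n (some lo) (some (PySem.Str.len n - hi))))

def build_alt (architecture : List (String × List (List (String × String)))) : List String × (List (String × List String)) :=
  let inventory := (PySem.Dict.mk architecture).getD "file_inventory" []
  let nodes := inventory.map (fun item => ((PySem.Dict.mk item).get? "path").getD "")
  let models := buildIndex nodes "domain/model/" ".java"
  let repos := buildIndex nodes "domain/repository/" "Repository.java"
  let services := buildIndex nodes "application/service/" "Service.java"
  let edges := inventory.foldl (fun ed item =>
      let entity := ((PySem.Dict.mk item).get? "entity").getD ""
      if entity = "" then ed
      else
        let path := ((PySem.Dict.mk item).get? "path").getD ""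
        let desc := ((PySem.Dict.mk item).get? "description").getD ""
        if desc = "Service" then
          let ed := if repos.contains entity then
              ed.modify path [] (fun s => PySem.Set.add s ("domain/repository/" ++ entity ++ "Repository.java"))
            else ed
          if models.contains entity then
            ed.modify path [] (fun s => PySem.Set.add s ("domain/model/" ++ entity ++ ".java"))
          else ed
        else if desc = "Repository Interface" ∨ desc = "Mapper" then
          if models.contains entity then
            ed.modify path [] (fun s => PySem.Set.add s ("domain/model/" ++ entity ++ ".java"))
          else ed
        else if desc = "Controller" then
          if services.contains entity then
            ed.modify path [] (fun s => PySem.Set.add s ("application/service/" ++ entity ++ "Service.java"))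
          else ed
        else ed)
    (PySem.Dict.empty : PySem.Dict String (PySem.Set String))
  (nodes, edges.items)

-- ===== PRECONDITION & SPEC =====
-- Pre_build: every inventory item carries a "path" key; A raises KeyError (item["path"]) otherwise, and so does B.
def Pre_build (architecture : List (String × List (List (String × String)))) : Prop :=
  ∀ item ∈ (PySem.Dict.mk architecture).getD "file_inventory" [],
    ((PySem.Dict.mk item).get? "path").isSome = true
instance (architecture : List (String × List (List (String × String)))) : Decidable (Pre_build architecture) := by unfold Pre_build; infer_instance
def pvWitness_build : (List (String × List (List (String × String)))) :=
  [("file_inventory",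
     [ [("path", "domain/model/X.java"), ("entity", "X"), ("description", "Mapper")]
     , [("path", "app/S.java"), ("entity", "X"), ("description", "Service")] ])]

def Spec_build (architecture : List (String × List (List (String × String)))) (out : List String × (List (String × List String))) : Prop := out = build_alt architecture
instance (architecture : List (String × List (List (String × String)))) (out : List String × (List (String × List String))) : Decidable (Spec_build architecture out) := by unfold Spec_build; infer_instance

-- ===== CLAIM (what is proved, stated in full; the proofs are below) =====
def Claim_equal_build : Prop := ∀ (architecture : List (String × List (List (String × String)))), Dom_build architecture → Pre_build architecture → Spec_build architecture (build architecture)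

-- ===== LEMMAS AND PROOFS =====

-- n = p ++ e ++ s exactly when p is a prefix, s a suffix, the lengths fit, and the middle slice is e.
theorem triple_decomp {α : Type} (p s e n : List α) :
    (p.length + s.length ≤ n.length ∧ p <+: n ∧ s <:+ n ∧
      (n.drop p.length).take (n.length - p.length - s.length) = e) ↔ n = p ++ e ++ s := by
  constructor
  · rintro ⟨hlen, ⟨r, rfl⟩, ⟨t, ht⟩, hmid⟩
    have hsle : s.length ≤ r.length := by
      simp at hlen; omega
    have htl : t.length = p.length + (r.length - s.length) := by
      have := congrArg List.length ht
      simp at this; omega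
    have hs : s = r.drop (r.length - s.length) := by
      have h0 : s = (t ++ s).drop t.length := by simp
      rw [ht, htl, List.drop_append] at h0
      rw [List.drop_eq_nil_of_le (by omega)] at h0
      simpa using h0
    have hsr : s <:+ r := by
      refine ⟨r.take (r.length - s.length), ?_⟩
      conv_rhs => rw [← List.take_append_drop (r.length - s.length) r]
      rw [← hs]
    obtain ⟨m, rfl⟩ := hsr
    have hm : m = e := by
      rw [← hmid]
      have h1 : (p ++ (m ++ s)).drop p.length = m ++ s := by simp
      have h2 : (p ++ (m ++ s)).length - p.length - s.length = m.length := by simp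
      rw [h1, h2, List.take_left]
    rw [hm]; simp
  · rintro rfl
    refine ⟨by simp, ⟨e ++ s, by simp⟩, ⟨p ++ e, by simp⟩, ?_⟩
    have h1 : (p ++ e ++ s).drop p.length = e ++ s := by simp
    have h2 : (p ++ e ++ s).length - p.length - s.length = e.length := by simp
    rw [h1, h2, List.take_left]

-- Source B's guard-and-strip of one node equals "the node is exactly pre ++ e ++ suf".
theorem cond_mid_iff (pre suf n e : String) :
    ((decide (PySem.Str.len pre + PySem.Str.len suf ≤ PySem.Str.len n)
      && PySem.Str.startswith n pre && PySem.Str.endswith n suf) = true ∧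
     PySem.Str.slice n (some (PySem.Str.len pre)) (some (PySem.Str.len n - PySem.Str.len suf)) = e)
    ↔ n = pre ++ e ++ suf := by
  have hR : (n = pre ++ e ++ suf) ↔ (n.toList = pre.toList ++ e.toList ++ suf.toList) := by
    rw [← String.toList_inj]
    simp only [String.toList_append]
  rw [hR, ← triple_decomp pre.toList suf.toList e.toList n.toList]
  simp only [Bool.and_eq_true, decide_eq_true_iff, PySem.Str.len_eq,
    PySem.Str.startswith, PySem.Str.endswith,
    PySem.Chars.startswith_iff, PySem.Chars.endswith_iff]
  constructor
  · rintro ⟨⟨⟨hlen, hpre⟩, hsuf⟩, hmid⟩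
    have hlen' : pre.toList.length + suf.toList.length ≤ n.toList.length := by exact_mod_cast hlen
    refine ⟨hlen', hpre, hsuf, ?_⟩
    have h := congrArg String.toList hmid
    rw [PySem.Str.toList_slice, PySem.Chars.slice_eq_listSlice] at h
    have hcast : ((n.toList.length : Int) - (suf.toList.length : Int))
        = ((n.toList.length - suf.toList.length : Nat) : Int) := by omega
    rw [hcast, PySem.List.slice_natCast] at h
    have horder : n.toList.length - suf.toList.length - pre.toList.length
        = n.toList.length - pre.toList.length - suf.toList.length := by omega
    rw [horder] at h
    exact h
  · rintro ⟨hlen', hpre, hsuf, hmid⟩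
    have hlen : (pre.toList.length : Int) + (suf.toList.length : Int) ≤ (n.toList.length : Int) := by
      exact_mod_cast hlen'
    refine ⟨⟨⟨hlen, hpre⟩, hsuf⟩, ?_⟩
    rw [← String.toList_inj, PySem.Str.toList_slice, PySem.Chars.slice_eq_listSlice]
    have hcast : ((n.toList.length : Int) - (suf.toList.length : Int))
        = ((n.toList.length - suf.toList.length : Nat) : Int) := by omega
    rw [hcast, PySem.List.slice_natCast]
    have horder : n.toList.length - suf.toList.length - pre.toList.length
        = n.toList.length - pre.toList.length - suf.toList.length := by omega
    rw [horder]
    exact hmid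

-- Entity membership in a parsed role index equals A's scan for the formatted path.
theorem contains_buildIndex (nodes : List String) (pre suf e : String) :
    PySem.Set.contains (buildIndex nodes pre suf) e = nodes.contains (pre ++ e ++ suf) := by
  rw [Bool.eq_iff_iff]
  simp only [buildIndex, PySem.Set.contains, List.contains_eq_mem, decide_eq_true_iff,
    PySem.Set.mem_ofList, List.mem_map, List.mem_filter]
  constructor
  · rintro ⟨n, ⟨hn, hc⟩, hmid⟩
    have := (cond_mid_iff pre suf n e).mp ⟨hc, hmid⟩
    exact this ▸ hn
  · intro h
    obtain ⟨hc, hmid⟩ := (cond_mid_iff pre suf (pre ++ e ++ suf) e).mpr rfl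
    exact ⟨pre ++ e ++ suf, ⟨h, hc⟩, hmid⟩

theorem foldl_ext_eq {α β : Type} (f g : β → α → β) (h : ∀ b a, f b a = g b a)
    (l : List α) (b : β) : l.foldl f b = l.foldl g b := by
  induction l generalizing b with
  | nil => rfl
  | cons x xs ih => simp [List.foldl, h, ih]

-- One inventory item: A's four if-branches over a node scan equal B's elif chain over the parsed indexes.
theorem step_eq (ns : List String) (path entity desc : String)
    (ed : PySem.Dict String (PySem.Set String)) :
    (if entity = "" then ed
     else
       let ed :=
         if desc = "Service" then
           let dep := "domain/repository/" ++ entity ++ "Repository.java"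
           let ed := if ns.contains dep then ed.modify path [] (fun s => PySem.Set.add s dep) else ed
           let dep := "domain/model/" ++ entity ++ ".java"
           if ns.contains dep then ed.modify path [] (fun s => PySem.Set.add s dep) else ed
         else ed
       let ed :=
         if desc = "Repository Interface" then
           let dep := "domain/model/" ++ entity ++ ".java"
           if ns.contains dep then ed.modify path [] (fun s => PySem.Set.add s dep) else ed
         else ed
       let ed :=
         if desc = "Controller" then
           let dep := "application/service/" ++ entity ++ "Service.java"
           if ns.contains dep then ed.modify path [] (fun s => PySem.Set.add s dep) else ed
         else ed
       if desc = "Mapper" then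
         let dep := "domain/model/" ++ entity ++ ".java"
         if ns.contains dep then ed.modify path [] (fun s => PySem.Set.add s dep) else ed
       else ed)
    =
    (if entity = "" then ed
     else
       if desc = "Service" then
         let ed := if (buildIndex ns "domain/repository/" "Repository.java").contains entity then
             ed.modify path [] (fun s => PySem.Set.add s ("domain/repository/" ++ entity ++ "Repository.java"))
           else ed
         if (buildIndex ns "domain/model/" ".java").contains entity then
           ed.modify path [] (fun s => PySem.Set.add s ("domain/model/" ++ entity ++ ".java"))
         else ed
       else if desc = "Repository Interface" ∨ desc = "Mapper" then
         if (buildIndex ns "domain/model/" ".java").contains entity then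
           ed.modify path [] (fun s => PySem.Set.add s ("domain/model/" ++ entity ++ ".java"))
         else ed
       else if desc = "Controller" then
         if (buildIndex ns "application/service/" "Service.java").contains entity then
           ed.modify path [] (fun s => PySem.Set.add s ("application/service/" ++ entity ++ "Service.java"))
         else ed
       else ed) := by
  by_cases he : entity = ""
  · simp [he]
  · rw [contains_buildIndex ns "domain/repository/" "Repository.java" entity,
        contains_buildIndex ns "domain/model/" ".java" entity,
        contains_buildIndex ns "application/service/" "Service.java" entity]
    by_cases h1 : desc = "Service"
    · subst h1; simp [he]
    · by_cases h2 : desc = "Repository Interface"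
      · subst h2; simp [he]
      · by_cases h3 : desc = "Controller"
        · subst h3; simp [he]
        · by_cases h4 : desc = "Mapper"
          · subst h4; simp [he]
          · simp [he, h1, h2, h3, h4]

-- ===== VERDICT (by name: the statement is the Claim_ definition above) =====
theorem build_spec : Claim_equal_build := by
  intro arch _ _
  show build arch = build_alt arch
  simp only [build, build_alt, PySem.List.foldl_append_singleton_eq_map, List.nil_append,
    Prod.mk.injEq, true_and]
  refine congrArg PySem.Dict.items ?_
  exact foldl_ext_eq _ _ (fun ed item => step_eq _ _ _ _ _) _ _
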